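-- pv_equiv track=rewrite | github.com/goddessofpom/restframework_template | core/utils.py | decode_invite_code
-- ===== SOURCE A (Python) =====
-- def decode_invite_code(code: str) -> int:
--     code_list = []
--     s = "A9C8EF7HIJ6LMN5Q3STUV2XYZ1WR4PKGDB"
--
--     for i in range(1, len(code) - 1):
--         code_list.append(code[i])
--
--     rate = 0
--     pk = 0
--
--     while len(code_list) > 0:
--         mark = code_list.pop()
--         pk = pk + s.index(mark) * (34 ** rate)
--         rate += 1
--     return pk
-- ===== SOURCE B (Python) =====
-- def decode_invite_code(code: str) -> int:
--     s = "A9C8EF7HIJ6LMN5Q3STUV2XYZ1WR4PKGDB"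
--     pk = 0
--     for c in code[1:-1]:
--         pk = pk * 34 + s.index(c)
--     return pk
-- ===== Notes on version B (the rewrite author's own statement) =====
-- stated objective: simpler
-- what changed: Replaces the explicit code_list stack, end-popping while loop and 34**rate power accumulator with a single left-to-right Horner pass over code[1:-1] (pk = pk*34 + s.index(c)); s.index is kept so unknown characters raise ValueError exactly as A does.
import Mathlib
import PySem

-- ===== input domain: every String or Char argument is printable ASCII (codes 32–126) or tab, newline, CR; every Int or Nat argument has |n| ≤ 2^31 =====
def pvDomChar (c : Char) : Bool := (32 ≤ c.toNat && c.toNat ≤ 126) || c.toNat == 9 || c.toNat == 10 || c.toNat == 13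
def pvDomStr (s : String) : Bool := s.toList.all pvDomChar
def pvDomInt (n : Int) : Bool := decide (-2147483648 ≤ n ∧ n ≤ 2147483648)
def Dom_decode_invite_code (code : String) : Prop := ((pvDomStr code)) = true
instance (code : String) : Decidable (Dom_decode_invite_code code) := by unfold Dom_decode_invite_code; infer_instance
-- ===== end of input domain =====

-- B replaces A's code_list stack, end-popping while loop and 34**rate power accumulator
-- with a single left-to-right Horner pass over code[1:-1] (objective: simpler).

-- ===== PORT A =====
-- the alphabet string s and s.index(c), shared verbatim by both Pythons
def pvS : List Char := "A9C8EF7HIJ6LMN5Q3STUV2XYZ1WR4PKGDB".toList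
def pvIdx (c : Char) : Int := PySem.Chars.findFrom pvS [c] 0

-- the 'while len(code_list) > 0: mark = code_list.pop(); pk += s.index(mark)*34**rate; rate += 1' loop
def pvPopLoop (l : List Char) (rate : Nat) (pk : Int) : Int :=
  match h : PySem.List.pop? l (-1) with
  | none => pk
  | some mr => pvPopLoop mr.2 (rate + 1) (pk + pvIdx mr.1 * 34 ^ rate)
termination_by l.length
decreasing_by
  have := PySem.List.length_of_pop?_eq_some l h
  omega

def decode_invite_code (code : String) : Int :=
  let cs := code.toList
  let code_list := (PySem.List.pyRange 1 ((cs.length : Int) - 1) 1).foldl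
      (fun acc i => acc ++ [PySem.List.pyGetD cs i ' ']) []
  pvPopLoop code_list 0 0

-- ===== PORT B =====
def decode_invite_code_alt (code : String) : Int :=
  (PySem.Chars.slice code.toList (some 1) (some (-1))).foldl
    (fun pk c => pk * 34 + pvIdx c) 0

-- ===== PRECONDITION & SPEC =====
-- Pre_ excludes exactly the inputs where an inner character is not in the alphabet s:
-- there both Pythons raise ValueError from s.index.
def Pre_decode_invite_code (code : String) : Prop :=
  ((code.toList.drop 1).dropLast.all (fun c => decide (c ∈ pvS))) = true
instance (code : String) : Decidable (Pre_decode_invite_code code) := by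
  unfold Pre_decode_invite_code; infer_instance
def pvWitness_decode_invite_code : String := "A9A"

def Spec_decode_invite_code (code : String) (out : Int) : Prop := out = decode_invite_code_alt code
instance (code : String) (out : Int) : Decidable (Spec_decode_invite_code code out) := by unfold Spec_decode_invite_code; infer_instance

-- ===== CLAIM (what is proved, stated in full; the proofs are below) =====
def Claim_equal_decode_invite_code : Prop := ∀ (code : String), Dom_decode_invite_code code → Pre_decode_invite_code code → Spec_decode_invite_code code (decode_invite_code code)

-- ===== LEMMAS AND PROOFS =====

-- big-endian base-34 value of a digit string
def pvVal : List Char → Int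
  | [] => 0
  | c :: t => pvIdx c * 34 ^ t.length + pvVal t

theorem pvVal_append_singleton (m : List Char) (c : Char) :
    pvVal (m ++ [c]) = 34 * pvVal m + pvIdx c := by
  induction m with
  | nil => simp [pvVal]
  | cons x m ih => simp [pvVal, ih, List.length_append]; ring

theorem pvPopLoop_eq (l : List Char) : ∀ (rate : Nat) (pk : Int),
    pvPopLoop l rate pk = pk + 34 ^ rate * pvVal l := by
  induction l using List.reverseRecOn with
  | nil =>
      intro rate pk
      rw [pvPopLoop.eq_def]
      split
      · simp [pvVal]
      · next mr h => simp [PySem.List.pop?, PySem.List.pyIdx?] at h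
  | append_singleton m c ih =>
      intro rate pk
      rw [pvPopLoop.eq_def]
      split
      · next h => rw [PySem.List.pop?_last] at h; exact absurd h (by simp)
      · next mr h =>
          rw [PySem.List.pop?_last] at h
          cases h.symm
          rw [ih, pvVal_append_singleton]
          ring

theorem pvHorner_eq (l : List Char) : ∀ (a : Int),
    l.foldl (fun pk c => pk * 34 + pvIdx c) a = a * 34 ^ l.length + pvVal l := by
  induction l with
  | nil => intro a; simp [pvVal]
  | cons c t ih =>
      intro a
      simp only [List.foldl_cons, ih, pvVal, List.length_cons]
      ring

-- A's collected code_list is exactly the inner characters (code.toList.drop 1).dropLast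
theorem pvCodeList_eq (cs : List Char) :
    (PySem.List.pyRange 1 ((cs.length : Int) - 1) 1).foldl
      (fun acc i => acc ++ [PySem.List.pyGetD cs i ' ']) []
    = (cs.drop 1).dropLast := by
  rw [PySem.List.foldl_append_singleton_eq_map]
  rcases cs with _ | ⟨x, t⟩
  · simp [PySem.List.pyRange_one_eq_nil]
  · have hlen : ((x :: t).dropLast.length : Int) = ((x :: t).length : Int) - 1 := by
      simp [List.length_dropLast]
    have hcongr :
        (PySem.List.pyRange 1 (((x :: t).length : Int) - 1) 1).map
          (fun i => PySem.List.pyGetD (x :: t) i ' ')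
        = (PySem.List.pyRange 1 (((x :: t).dropLast.length : Int)) 1).map
          (fun i => PySem.List.pyGetD (x :: t).dropLast i ' ') := by
      rw [hlen]
      apply List.map_congr_left
      intro i hi
      rw [PySem.List.mem_pyRange_one] at hi
      obtain ⟨h1, h2⟩ := hi
      have hnat : ∃ k : Nat, i = (k : Int) ∧ k < (x :: t).dropLast.length := by
        refine ⟨i.toNat, by omega, by omega⟩
      obtain ⟨k, rfl, hk⟩ := hnat
      rw [PySem.List.pyGetD_natCast, PySem.List.pyGetD_natCast]
      have hk' : k < (x :: t).length := by
        have : (x :: t).dropLast.length = (x :: t).length - 1 := List.length_dropLast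
        omega
      rw [List.getD_eq_getElem _ _ hk, List.getD_eq_getElem _ _ hk']
      exact (List.getElem_dropLast hk).symm
    rw [hcongr]
    have := PySem.List.map_pyGetD_pyRange (xs := (x :: t).dropLast) (a := 1)
      (d := ' ') (by omega)
    have htail : (x :: t).dropLast.tail = t.dropLast := by
      cases t <;> simp
    simpa [PySem.List.len, htail] using this
  
-- B's slice code[1:-1] is the same inner list
theorem pvSlice_eq (cs : List Char) :
    PySem.Chars.slice cs (some 1) (some (-1)) = (cs.drop 1).dropLast := by
  have h1 : PySem.Chars.slice cs (some 1) (some (-1))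
      = PySem.List.slice cs (some 1) (some (-1)) := rfl
  rw [h1]
  rcases cs with _ | ⟨x, t⟩
  · simp [PySem.List.slice]
  · simp [PySem.List.slice, List.dropLast_eq_take]

-- ===== VERDICT (by name: the statement is the Claim_ definition above) =====
theorem decode_invite_code_spec : Claim_equal_decode_invite_code := by
  intro code _ _
  unfold Spec_decode_invite_code decode_invite_code decode_invite_code_alt
  simp only
  rw [pvCodeList_eq, pvSlice_eq, pvPopLoop_eq, pvHorner_eq]
  simp
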